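-- pv_equiv track=rewrite | github.com/jorul/ITGK | ITGK øvinger/Eksamen 2016/3.py | vinnerparti
-- ===== SOURCE A (Python) =====
-- parties = ['TeaParty','CoffeeParty','MilkParty','HouseParty','BeachParty']
--
-- def vinnerparti(valgdata, nr):
--     lederindex = 0
--     for i in range(len(valgdata[nr])):
--         if valgdata[nr][i] > valgdata[nr][lederindex]:
--             lederindex = i
--     if valgdata[nr][lederindex] == 0: #hvis det med flest stemmer har fått null stemmer
--         return 'no votes'
--     for j in range(len(valgdata[nr])):
--         if j != lederindex:
--             if valgdata[nr][j] == valgdata[nr][lederindex]: # dersom et annet parti har fått like mange stemmer som det som har fått flest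
--                 return 'tied'
--     return parties[lederindex] #partiet med flest stemmer returneres
-- ===== SOURCE B (Python) =====
-- parties = ['TeaParty','CoffeeParty','MilkParty','HouseParty','BeachParty']
--
-- def vinnerparti(valgdata, nr):
--     row = valgdata[nr]
--     s = sorted(row, reverse=True)
--     if s[0] == 0:
--         return 'no votes'
--     if len(s) > 1 and s[0] == s[1]:
--         return 'tied'
--     return parties[row.index(s[0])]
-- ===== Notes on version B (the rewrite author's own statement) =====
-- stated objective: alternative
-- what changed: Replaces A's manual leader-index scan and second tie-scan loop with a descending sort: the maximum is s[0], a tie is exactly s[0]==s[1], and the winner index is row.index(s[0]).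
import Mathlib
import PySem

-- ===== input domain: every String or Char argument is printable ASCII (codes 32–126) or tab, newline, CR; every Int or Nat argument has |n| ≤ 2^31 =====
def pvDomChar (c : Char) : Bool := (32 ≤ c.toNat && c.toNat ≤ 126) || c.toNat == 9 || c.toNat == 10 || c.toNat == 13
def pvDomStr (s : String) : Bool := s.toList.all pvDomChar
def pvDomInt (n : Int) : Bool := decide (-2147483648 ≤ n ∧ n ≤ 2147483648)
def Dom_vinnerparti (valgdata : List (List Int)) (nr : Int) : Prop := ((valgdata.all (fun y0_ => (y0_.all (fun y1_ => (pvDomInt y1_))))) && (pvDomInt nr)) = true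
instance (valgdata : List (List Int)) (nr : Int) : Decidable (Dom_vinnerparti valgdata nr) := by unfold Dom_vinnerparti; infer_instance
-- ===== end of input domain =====

-- B replaces A's leader-index scan and second tie-scan loop with a descending sort (max = s[0], tie ⟺ s[0]==s[1]); alternative decomposition, not faster.

def parties : List String := ["TeaParty", "CoffeeParty", "MilkParty", "HouseParty", "BeachParty"]

-- ===== PORT A =====
-- 'valgdata[nr]' is bound once as 'row' (Python recomputes the same value each time).
def vinnerparti (valgdata : List (List Int)) (nr : Int) : String :=
  let row := (PySem.List.pyGet? valgdata nr).getD []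
  let led := (List.range row.length).foldl
    (fun led i => if row.getD led 0 < row.getD i 0 then i else led) 0
  if row.getD led 0 = 0 then "no votes"
  else if (List.range row.length).any
      (fun j => decide (j ≠ led) && decide (row.getD j 0 = row.getD led 0)) then "tied"
  else (PySem.List.pyGet? parties (led : Int)).getD ""

-- ===== PORT B =====
def vinnerparti_alt (valgdata : List (List Int)) (nr : Int) : String :=
  let row := (PySem.List.pyGet? valgdata nr).getD []
  let s := PySem.List.sorted row (fun x => x) true
  if s.getD 0 0 = 0 then "no votes"
  else if decide (1 < s.length) && decide (s.getD 0 0 = s.getD 1 0) then "tied"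
  else (PySem.List.pyGet? parties (((PySem.List.index? row (s.getD 0 0)).getD 0 : Nat) : Int)).getD ""

-- ===== PRECONDITION & SPEC =====
-- Pre_ excludes exactly the inputs where Python A raises: nr out of range or an empty
-- row (IndexError at valgdata[nr][lederindex]), and rows whose unique nonzero leader
-- sits at index ≥ 5 (IndexError at parties[lederindex]).
def Pre_vinnerparti (valgdata : List (List Int)) (nr : Int) : Prop :=
  (match PySem.List.pyGet? valgdata nr with
   | none => false
   | some [] => false
   | some (x :: t) =>
     let m := t.foldl max x
     (m == 0) || decide (2 ≤ (x :: t).count m) || decide ((x :: t).idxOf m < 5)) = true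
instance (valgdata : List (List Int)) (nr : Int) : Decidable (Pre_vinnerparti valgdata nr) := by
  unfold Pre_vinnerparti; infer_instance

def pvWitness_vinnerparti : List (List Int) × Int := ([[1, 2, 3]], 0)

def Spec_vinnerparti (valgdata : List (List Int)) (nr : Int) (out : String) : Prop := out = vinnerparti_alt valgdata nr
instance (valgdata : List (List Int)) (nr : Int) (out : String) : Decidable (Spec_vinnerparti valgdata nr out) := by unfold Spec_vinnerparti; infer_instance

-- ===== CLAIM (what is proved, stated in full; the proofs are below) =====
def Claim_equal_vinnerparti : Prop := ∀ (valgdata : List (List Int)) (nr : Int), Dom_vinnerparti valgdata nr → Pre_vinnerparti valgdata nr → Spec_vinnerparti valgdata nr (vinnerparti valgdata nr)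

-- ===== LEMMAS AND PROOFS =====

lemma led_inv (row : List Int) : ∀ n : Nat, 0 < n →
    ((List.range n).foldl (fun led i => if row.getD led 0 < row.getD i 0 then i else led) 0) < n ∧
    (∀ k, k < n → row.getD k 0 ≤ row.getD ((List.range n).foldl (fun led i => if row.getD led 0 < row.getD i 0 then i else led) 0) 0) ∧
    (∀ k, k < ((List.range n).foldl (fun led i => if row.getD led 0 < row.getD i 0 then i else led) 0) → row.getD k 0 < row.getD ((List.range n).foldl (fun led i => if row.getD led 0 < row.getD i 0 then i else led) 0) 0) := by
  intro n hn
  induction n with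
  | zero => omega
  | succ n ih =>
    by_cases h0 : n = 0
    · subst h0
      simp
    · obtain ⟨h1, h2, h3⟩ := ih (Nat.pos_of_ne_zero h0)
      rw [List.range_succ, List.foldl_append, List.foldl_cons, List.foldl_nil]
      set L := (List.range n).foldl (fun led i => if row.getD led 0 < row.getD i 0 then i else led) 0 with hL
      split_ifs with hlt
      · refine ⟨Nat.lt_succ_self n, ?_, ?_⟩
        · intro k hk
          rcases Nat.lt_succ_iff_lt_or_eq.mp hk with hk' | hk'
          · exact le_of_lt (lt_of_le_of_lt (h2 k hk') hlt)
          · simp [hk']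
        · intro k hk
          exact lt_of_le_of_lt (h2 k hk) hlt
      · exact ⟨Nat.lt_succ_of_lt h1, fun k hk => by
          rcases Nat.lt_succ_iff_lt_or_eq.mp hk with hk' | hk'
          · exact h2 k hk'
          · subst hk'; omega, h3⟩

lemma sorted_rev_head (row : List Int) (M : Int) (hM : M ∈ row) (hmax : ∀ y ∈ row, y ≤ M) :
    (PySem.List.sorted row (fun x => x) true).getD 0 0 = M := by
  cases hs : PySem.List.sorted row (fun x => x) true with
  | nil =>
    have := (PySem.List.sorted_perm row (fun x => x) true)
    rw [hs] at this
    rw [this.symm.eq_nil] at hM  -- row = []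
    cases hM
  | cons m t =>
    have hge := PySem.List.key_head_sorted_rev_ge (xs := row) (key := fun x => x) hs
    have hmem : m ∈ row := (PySem.List.mem_sorted _ _ _ _).mp (by rw [hs]; exact List.mem_cons_self)
    have h1 : M ≤ m := hge M hM
    have h2 : m ≤ M := hmax m hmem
    simp [le_antisymm h2 h1]

lemma count_split (row : List Int) (M : Int) (led : Nat) (hl : led < row.length) (hM : row[led] = M) :
    2 ≤ row.count M ↔ ∃ j, j < row.length ∧ j ≠ led ∧ row.getD j 0 = M := by
  have hdecomp : row = row.take led ++ M :: row.drop (led + 1) := by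
    conv_lhs => rw [← List.take_append_drop led row]
    rw [List.drop_eq_getElem_cons hl, hM]
  have hlen_take : (row.take led).length = led := by
    rw [List.length_take]; omega
  constructor
  · intro hc
    rw [hdecomp, List.count_append, List.count_cons_self] at hc
    have : 0 < (row.take led).count M ∨ 0 < (row.drop (led + 1)).count M := by omega
    rcases this with h | h
    · have hmem := List.count_pos_iff.mp h
      obtain ⟨i, hi, hgi⟩ := List.mem_iff_getElem.mp hmem
      refine ⟨i, by omega, by omega, ?_⟩
      rw [List.getD_eq_getElem row 0 (by omega : i < row.length)]
      rw [List.getElem_take] at hgi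
      exact hgi
    · have hmem := List.count_pos_iff.mp h
      obtain ⟨i, hi, hgi⟩ := List.mem_iff_getElem.mp hmem
      rw [List.length_drop] at hi
      refine ⟨led + 1 + i, by omega, by omega, ?_⟩
      rw [List.getD_eq_getElem row 0 (by omega : led + 1 + i < row.length)]
      rw [List.getElem_drop] at hgi
      exact hgi
  · rintro ⟨j, hj, hjne, hjv⟩
    rw [List.getD_eq_getElem row 0 hj] at hjv
    rw [hdecomp, List.count_append, List.count_cons_self]
    rcases Nat.lt_or_ge j led with h | h
    · have : M ∈ row.take led := by
        rw [List.mem_iff_getElem]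
        exact ⟨j, by omega, by rw [List.getElem_take]; exact hjv⟩
      have := List.count_pos_iff.mpr this
      omega
    · have hgt : led < j := by omega
      have : M ∈ row.drop (led + 1) := by
        rw [List.mem_iff_getElem]
        refine ⟨j - (led + 1), by rw [List.length_drop]; omega, ?_⟩
        rw [List.getElem_drop]
        have : led + 1 + (j - (led + 1)) = j := by omega
        simp [this, hjv]
      have := List.count_pos_iff.mpr this
      omega

lemma second_iff (row : List Int) (M : Int) (hM : M ∈ row) (hmax : ∀ y ∈ row, y ≤ M) :
    (1 < (PySem.List.sorted row (fun x => x) true).length ∧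
      (PySem.List.sorted row (fun x => x) true).getD 0 0 = (PySem.List.sorted row (fun x => x) true).getD 1 0)
    ↔ 2 ≤ row.count M := by
  have hperm := PySem.List.sorted_perm row (fun x => x) true
  have hcnt : (PySem.List.sorted row (fun x => x) true).count M = row.count M := hperm.count_eq M
  have hhead := sorted_rev_head row M hM hmax
  have hpw := PySem.List.sorted_pairwise_rev (xs := row) (key := fun x => x)
  constructor
  · rintro ⟨hlen, heq⟩
    cases hs : PySem.List.sorted row (fun x => x) true with
    | nil => rw [hs] at hlen; simp at hlen
    | cons m t =>
      cases t with
      | nil => rw [hs] at hlen; simp at hlen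
      | cons t0 t' =>
        rw [hs] at heq hhead hcnt
        simp only [List.getD_cons_zero, List.getD_cons_succ] at heq hhead
        rw [← hcnt, ← hhead, heq]
        simp [List.count_cons_self]
  · intro hc
    rw [← hcnt] at hc
    cases hs : PySem.List.sorted row (fun x => x) true with
    | nil =>
      rw [hs] at hcnt
      simp at hcnt
      have := List.count_pos_iff.mpr hM
      omega
    | cons m t =>
      rw [hs] at hcnt hhead hpw
      simp only [List.getD_cons_zero] at hhead
      subst hhead
      rw [hs, List.count_cons_self] at hc
      have htm : m ∈ t := List.count_pos_iff.mp (by omega)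
      cases t with
      | nil => cases htm
      | cons t0 t' =>
        rw [List.pairwise_cons] at hpw
        obtain ⟨hall, hpw'⟩ := hpw
        rw [List.pairwise_cons] at hpw'
        obtain ⟨hall', _⟩ := hpw'
        have ht0le : t0 ≤ m := hall t0 List.mem_cons_self
        have hMle : m ≤ t0 := by
          rcases List.mem_cons.mp htm with h | h
          · omega
          · exact hall' m h
        constructor
        · simp
        · simp only [List.getD_cons_zero, List.getD_cons_succ]
          omega

lemma index_first (row : List Int) (led : Nat) (hl : led < row.length)
    (hfirst : ∀ k, k < led → row.getD k 0 < row.getD led 0) :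
    PySem.List.index? row (row.getD led 0) = some led := by
  rw [PySem.List.index?_eq_some_iff]
  refine ⟨row.take led, row.drop (led + 1), ?_, by rw [List.length_take]; omega, ?_⟩
  · conv_lhs => rw [← List.take_append_drop led row]
    rw [List.drop_eq_getElem_cons hl, List.getD_eq_getElem row 0 hl]
  · intro hmem
    obtain ⟨i, hi, hgi⟩ := List.mem_iff_getElem.mp hmem
    rw [List.length_take] at hi
    rw [List.getElem_take] at hgi
    have := hfirst i (by omega)
    rw [List.getD_eq_getElem row 0 (by omega : i < row.length)] at this
    omega

lemma core (row : List Int) :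
    (if row.getD ((List.range row.length).foldl (fun led i => if row.getD led 0 < row.getD i 0 then i else led) 0) 0 = 0 then "no votes"
     else if (List.range row.length).any (fun j => decide (j ≠ (List.range row.length).foldl (fun led i => if row.getD led 0 < row.getD i 0 then i else led) 0) && decide (row.getD j 0 = row.getD ((List.range row.length).foldl (fun led i => if row.getD led 0 < row.getD i 0 then i else led) 0) 0)) then "tied"
     else (PySem.List.pyGet? parties (((List.range row.length).foldl (fun led i => if row.getD led 0 < row.getD i 0 then i else led) 0 : Nat) : Int)).getD "") =
    (if (PySem.List.sorted row (fun x => x) true).getD 0 0 = 0 then "no votes"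
     else if decide (1 < (PySem.List.sorted row (fun x => x) true).length) && decide ((PySem.List.sorted row (fun x => x) true).getD 0 0 = (PySem.List.sorted row (fun x => x) true).getD 1 0) then "tied"
     else (PySem.List.pyGet? parties (((PySem.List.index? row ((PySem.List.sorted row (fun x => x) true).getD 0 0)).getD 0 : Nat) : Int)).getD "") := by
  rcases eq_or_ne row [] with hnil | hne
  · subst hnil; rfl
  · obtain ⟨hl, hmax, hfirst⟩ := led_inv row row.length (List.length_pos_iff.mpr hne)
    set led := (List.range row.length).foldl (fun led i => if row.getD led 0 < row.getD i 0 then i else led) 0 with hled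
    set s := PySem.List.sorted row (fun x => x) true with hs
    set M := row.getD led 0 with hM
    have hMel : M = row[led]'hl := List.getD_eq_getElem row 0 hl
    have hMmem : M ∈ row := by rw [hMel]; exact List.getElem_mem hl
    have hmax' : ∀ y ∈ row, y ≤ M := by
      intro y hy
      obtain ⟨k, hk, hgk⟩ := List.mem_iff_getElem.mp hy
      have := hmax k hk
      rw [List.getD_eq_getElem row 0 hk] at this
      rw [← hgk]
      exact this
    have hs0 : s.getD 0 0 = M := sorted_rev_head row M hMmem hmax'
    rw [hs0]
    by_cases h0 : M = 0
    · simp [h0]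
    · rw [if_neg h0, if_neg h0]
      have hcond : ((List.range row.length).any (fun j => decide (j ≠ led) && decide (row.getD j 0 = M)))
          = (decide (1 < s.length) && decide (M = s.getD 1 0)) := by
        rw [Bool.eq_iff_iff]
        simp only [List.any_eq_true, List.mem_range, Bool.and_eq_true, decide_eq_true_eq]
        have h1 := count_split row M led hl hMel.symm
        have h2 := second_iff row M hMmem hmax'
        rw [hs0] at h2
        rw [← hs] at h2
        constructor
        · rintro ⟨j, hj, hjne, hjv⟩
          have := h1.mpr ⟨j, hj, hjne, hjv⟩
          have := h2.mpr this
          exact ⟨this.1, this.2⟩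
        · rintro ⟨hlen, heq⟩
          obtain ⟨j, hj, hjne, hjv⟩ := h1.mp (h2.mp ⟨hlen, heq⟩)
          exact ⟨j, hj, hjne, hjv⟩
      rw [hcond]
      by_cases htied : (decide (1 < s.length) && decide (M = s.getD 1 0)) = true
      · rw [if_pos htied, if_pos htied]
      · rw [if_neg htied, if_neg htied]
        rw [index_first row led hl hfirst]
        rfl

lemma AB_eq (valgdata : List (List Int)) (nr : Int) :
    vinnerparti valgdata nr = vinnerparti_alt valgdata nr :=
  core ((PySem.List.pyGet? valgdata nr).getD [])

-- ===== VERDICT (by name: the statement is the Claim_ definition above) =====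
theorem vinnerparti_spec : Claim_equal_vinnerparti := by
  intro valgdata nr _ _
  unfold Spec_vinnerparti
  exact AB_eq valgdata nr
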